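-- pv_equiv track=rewrite | github.com/changeworld/hackerrank | domains/mathematics/fundamentals/russian-peasant-exponentiation.py | calc
-- ===== SOURCE A (Python) =====
-- def square(ar, ai, br, bi, m):
--     return ((ar * br) % m - (ai * bi) % m) % m, (
--         (ar * bi) % m + (ai * br) % m) % m
--
-- def calc(a, b, p, m):
--     resr = 1
--     resi = 0
--     while p > 0:
--         if p % 2 == 1:
--             resr, resi = square(resr, resi, a, b, m)
--         a, b = square(a, b, a, b, m)
--         p = p // 2
--     return resr, resi
-- ===== SOURCE B (Python) =====
-- def square(ar, ai, br, bi, m):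
--     return ((ar * br) % m - (ai * bi) % m) % m, (
--         (ar * bi) % m + (ai * br) % m) % m
--
-- def calc(a, b, p, m):
--     if p <= 0:
--         return 1, 0
--     hr, hi = calc(a, b, p // 2, m)
--     rr, ri = square(hr, hi, hr, hi, m)
--     if p % 2 == 1:
--         rr, ri = square(rr, ri, a, b, m)
--     return rr, ri
-- ===== Notes on version B (the rewrite author's own statement) =====
-- stated objective: alternative
-- what changed: Replaced the least-significant-bit-first while loop with an accumulator and a running squared base by a most-significant-bit-first divide-and-conquer recursion (recurse on p // 2, square the result, multiply in the base once if p is odd), reusing the identical square primitive.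
import Mathlib
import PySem

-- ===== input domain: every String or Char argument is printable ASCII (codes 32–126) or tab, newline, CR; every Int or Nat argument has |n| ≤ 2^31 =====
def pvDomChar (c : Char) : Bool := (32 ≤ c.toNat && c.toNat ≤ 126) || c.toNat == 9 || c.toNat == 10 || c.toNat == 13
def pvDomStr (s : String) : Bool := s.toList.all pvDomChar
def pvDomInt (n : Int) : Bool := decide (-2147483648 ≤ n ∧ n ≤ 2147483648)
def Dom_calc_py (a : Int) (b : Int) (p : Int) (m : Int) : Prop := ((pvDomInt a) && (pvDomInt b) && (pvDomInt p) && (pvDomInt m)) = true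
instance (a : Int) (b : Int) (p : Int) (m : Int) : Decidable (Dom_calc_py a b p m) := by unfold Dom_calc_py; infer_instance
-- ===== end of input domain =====

-- B replaces A's LSB-first while loop (accumulator + repeatedly squared base) by an MSB-first
-- divide-and-conquer recursion on p // 2 with the same `square` primitive; alternative decomposition, same cost.


-- ===== PORT A =====
-- `square` helper, identical in both Python sources
def pySquare (ar ai br bi m : Int) : Int × Int :=
  (PySem.Int.mod (PySem.Int.mod (ar * br) m - PySem.Int.mod (ai * bi) m) m,
   PySem.Int.mod (PySem.Int.mod (ar * bi) m + PySem.Int.mod (ai * br) m) m)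

-- the `while p > 0` loop of A, as structural recursion on the same state
def calcLoopA (resr resi a b p m : Int) : Int × Int :=
  if h : p > 0 then
    let res' := if PySem.Int.mod p 2 = 1 then pySquare resr resi a b m else (resr, resi)
    let ab' := pySquare a b a b m
    calcLoopA res'.1 res'.2 ab'.1 ab'.2 (PySem.Int.floordiv p 2) m
  else (resr, resi)
  termination_by p.toNat
  decreasing_by
    rw [PySem.Int.floordiv_eq_ediv_of_pos (by omega : (0:Int) < 2)]; omega

def calc_py (a : Int) (b : Int) (p : Int) (m : Int) : Int × Int :=
  calcLoopA 1 0 a b p m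

-- ===== PORT B =====
def calc_py_alt (a : Int) (b : Int) (p : Int) (m : Int) : Int × Int :=
  if h : p ≤ 0 then (1, 0)
  else
    let hh := calc_py_alt a b (PySem.Int.floordiv p 2) m
    let r := pySquare hh.1 hh.2 hh.1 hh.2 m
    if PySem.Int.mod p 2 = 1 then pySquare r.1 r.2 a b m else r
  termination_by p.toNat
  decreasing_by
    rw [PySem.Int.floordiv_eq_ediv_of_pos (by omega : (0:Int) < 2)]; omega

-- ===== PRECONDITION & SPEC =====
-- Pre_ excludes exactly m = 0 with p > 0, where both Pythons raise ZeroDivisionError in `square`.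
def Pre_calc_py (a : Int) (b : Int) (p : Int) (m : Int) : Prop := p ≤ 0 ∨ m ≠ 0
instance (a : Int) (b : Int) (p : Int) (m : Int) : Decidable (Pre_calc_py a b p m) := by unfold Pre_calc_py; infer_instance
def pvWitness_calc_py : Int × Int × Int × Int := (2, 3, 5, 7)

def Spec_calc_py (a : Int) (b : Int) (p : Int) (m : Int) (out : Int × Int) : Prop := out = calc_py_alt a b p m
instance (a : Int) (b : Int) (p : Int) (m : Int) (out : Int × Int) : Decidable (Spec_calc_py a b p m out) := by unfold Spec_calc_py; infer_instance

-- ===== CLAIM (what is proved, stated in full; the proofs are below) =====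
def Claim_equal_calc_py : Prop := ∀ (a : Int) (b : Int) (p : Int) (m : Int), Dom_calc_py a b p m → Pre_calc_py a b p m → Spec_calc_py a b p m (calc_py a b p m)

-- ===== LEMMAS AND PROOFS =====

-- Gaussian-integer multiplication, power, and componentwise Python mod
def gmul (x y : Int × Int) : Int × Int := (x.1 * y.1 - x.2 * y.2, x.1 * y.2 + x.2 * y.1)

def gpow (z : Int × Int) : Nat → Int × Int
  | 0 => (1, 0)
  | n + 1 => gmul (gpow z n) z

def red (m : Int) (z : Int × Int) : Int × Int := (PySem.Int.mod z.1 m, PySem.Int.mod z.2 m)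

-- componentwise congruence mod m
def GCong (m : Int) (x y : Int × Int) : Prop := m ∣ (x.1 - y.1) ∧ m ∣ (x.2 - y.2)

lemma pymod_sub_dvd (a m : Int) : m ∣ (PySem.Int.mod a m - a) :=
  ⟨-(PySem.Int.floordiv a m), by linear_combination PySem.Int.floordiv_mul_add_mod a m⟩

lemma pymod_congr {m a b : Int} (hm : m ≠ 0) (h : m ∣ (a - b)) :
    PySem.Int.mod a m = PySem.Int.mod b m := by
  have d1 := pymod_sub_dvd a m
  have d2 := pymod_sub_dvd b m
  have d : m ∣ (PySem.Int.mod a m - PySem.Int.mod b m) := by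
    have e : PySem.Int.mod a m - PySem.Int.mod b m =
        (PySem.Int.mod a m - a) - (PySem.Int.mod b m - b) + (a - b) := by ring
    rw [e]; exact dvd_add (dvd_sub d1 d2) h
  have habs : |m| ∣ (PySem.Int.mod a m - PySem.Int.mod b m) := (abs_dvd _ _).mpr d
  have hz : PySem.Int.mod a m - PySem.Int.mod b m = 0 := by
    apply Int.eq_zero_of_abs_lt_dvd habs
    rcases lt_or_gt_of_ne hm with hneg | hpos
    · have b1 := PySem.Int.mod_neg_bounds (a := a) hneg
      have b2 := PySem.Int.mod_neg_bounds (a := b) hneg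
      rw [abs_lt, abs_of_neg hneg]; omega
    · have b1l := PySem.Int.mod_nonneg (a := a) hpos
      have b1r := PySem.Int.mod_lt (a := a) hpos
      have b2l := PySem.Int.mod_nonneg (a := b) hpos
      have b2r := PySem.Int.mod_lt (a := b) hpos
      rw [abs_lt, abs_of_pos hpos]; omega
  omega

lemma gcong_refl (m : Int) (x : Int × Int) : GCong m x x := by
  constructor <;> simp

lemma gcong_red (m : Int) (x : Int × Int) : GCong m (red m x) x :=
  ⟨pymod_sub_dvd _ _, pymod_sub_dvd _ _⟩

lemma gcong_gmul {m : Int} {x x' y y' : Int × Int} (hx : GCong m x x') (hy : GCong m y y') :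
    GCong m (gmul x y) (gmul x' y') := by
  obtain ⟨k1, hk1⟩ := hx.1; obtain ⟨k2, hk2⟩ := hx.2
  obtain ⟨l1, hl1⟩ := hy.1; obtain ⟨l2, hl2⟩ := hy.2
  constructor
  · exact ⟨k1 * y.1 + x'.1 * l1 - k2 * y.2 - x'.2 * l2, by
      simp only [gmul]; linear_combination y.1 * hk1 + x'.1 * hl1 - y.2 * hk2 - x'.2 * hl2⟩
  · exact ⟨k1 * y.2 + x'.1 * l2 + k2 * y.1 + x'.2 * l1, by
      simp only [gmul]; linear_combination y.2 * hk1 + x'.1 * hl2 + y.1 * hk2 + x'.2 * hl1⟩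

lemma gcong_gpow {m : Int} {x y : Int × Int} (h : GCong m x y) (n : Nat) :
    GCong m (gpow x n) (gpow y n) := by
  induction n with
  | zero => exact gcong_refl m _
  | succ k ih => exact gcong_gmul ih h

lemma red_eq_of_gcong {m : Int} (hm : m ≠ 0) {x y : Int × Int} (h : GCong m x y) :
    red m x = red m y := by
  simp only [red, Prod.mk.injEq]
  exact ⟨pymod_congr hm h.1, pymod_congr hm h.2⟩

-- pySquare is gmul followed by componentwise reduction
lemma pySquare_eq_red_gmul {m : Int} (hm : m ≠ 0) (ar ai br bi : Int) :
    pySquare ar ai br bi m = red m (gmul (ar, ai) (br, bi)) := by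
  simp only [pySquare, red, gmul, Prod.mk.injEq]
  constructor
  · exact pymod_congr hm (by
      have h1 := pymod_sub_dvd (ar * br) m
      have h2 := pymod_sub_dvd (ai * bi) m
      have e : (PySem.Int.mod (ar * br) m - PySem.Int.mod (ai * bi) m) - (ar * br - ai * bi)
          = (PySem.Int.mod (ar * br) m - ar * br) - (PySem.Int.mod (ai * bi) m - ai * bi) := by ring
      rw [e]; exact dvd_sub h1 h2)
  · exact pymod_congr hm (by
      have h1 := pymod_sub_dvd (ar * bi) m
      have h2 := pymod_sub_dvd (ai * br) m
      have e : (PySem.Int.mod (ar * bi) m + PySem.Int.mod (ai * br) m) - (ar * bi + ai * br)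
          = (PySem.Int.mod (ar * bi) m - ar * bi) + (PySem.Int.mod (ai * br) m - ai * br) := by ring
      rw [e]; exact dvd_add h1 h2)

lemma gmul_assoc (x y z : Int × Int) : gmul (gmul x y) z = gmul x (gmul y z) := by
  simp only [gmul, Prod.mk.injEq]; constructor <;> ring

lemma gmul_one_left (z : Int × Int) : gmul (1, 0) z = z := by
  simp [gmul]

lemma gmul_comm (x y : Int × Int) : gmul x y = gmul y x := by
  simp only [gmul, Prod.mk.injEq]; constructor <;> ring

lemma gpow_add (z : Int × Int) (i j : Nat) : gpow z (i + j) = gmul (gpow z i) (gpow z j) := by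
  induction j with
  | zero => simp [gpow, gmul]
  | succ k ih =>
      have : i + (k + 1) = (i + k) + 1 := by omega
      rw [this]
      simp only [gpow, ih, gmul_assoc]

lemma gpow_sq (z : Int × Int) (n : Nat) : gpow (gmul z z) n = gpow z (2 * n) := by
  induction n with
  | zero => rfl
  | succ k ih =>
      show gmul (gpow (gmul z z) k) (gmul z z) = gpow z (2 * (k + 1))
      rw [ih, show 2 * (k + 1) = (2 * k) + 1 + 1 from by omega]
      simp only [gpow]
      rw [gmul_assoc]

-- arithmetic facts about p for one loop step
lemma step_arith {p : Int} (hp : 0 < p) :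
    (PySem.Int.floordiv p 2).toNat * 2 + (PySem.Int.mod p 2).toNat = p.toNat ∧
    (PySem.Int.mod p 2 = 1 ∨ PySem.Int.mod p 2 = 0) ∧
    0 ≤ PySem.Int.floordiv p 2 := by
  have h2 : (0:Int) < 2 := by omega
  have hfd := PySem.Int.floordiv_mul_add_mod p 2
  have hml := PySem.Int.mod_nonneg (a := p) h2
  have hmr := PySem.Int.mod_lt (a := p) h2
  refine ⟨by omega, by omega, by omega⟩

-- characterization of B: on 0 < p, m ≠ 0, it computes red m ((a,b)^p)
lemma calcAlt_char {m : Int} (hm : m ≠ 0) :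
    ∀ n (a b p : Int), 0 < p → p.toNat = n →
      calc_py_alt a b p m = red m (gpow (a, b) p.toNat) := by
  intro n
  induction n using Nat.strong_induction_on with
  | _ n ih =>
    intro a b p hp hn
    obtain ⟨hsum, hbit, hq0⟩ := step_arith hp
    rw [calc_py_alt]
    simp only [dif_neg (by omega : ¬ p ≤ 0)]
    set q := PySem.Int.floordiv p 2 with hq
    set c := calc_py_alt a b q m with hc
    have hh : c = if 0 < q then red m (gpow (a, b) q.toNat) else (1, 0) := by
      by_cases hqpos : 0 < q
      · rw [if_pos hqpos, hc]
        exact ih q.toNat (by omega) a b q hqpos rfl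
      · rw [if_neg hqpos, hc, calc_py_alt, dif_pos (by omega)]
    have hsq : pySquare c.1 c.2 c.1 c.2 m = red m (gpow (a, b) (2 * q.toNat)) := by
      rw [pySquare_eq_red_gmul hm]
      simp only [Prod.mk.eta]
      by_cases hqpos : 0 < q
      · rw [hh, if_pos hqpos,
            red_eq_of_gcong hm (gcong_gmul (gcong_red m (gpow (a, b) q.toNat))
              (gcong_red m (gpow (a, b) q.toNat))),
            show 2 * q.toNat = q.toNat + q.toNat from by omega, gpow_add]
      · rw [hh, if_neg hqpos, show q.toNat = 0 from by omega]
        simp [gmul, gpow, red]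
    rcases hbit with hodd | heven
    · rw [if_pos hodd, hsq, pySquare_eq_red_gmul hm]
      simp only [Prod.mk.eta]
      rw [red_eq_of_gcong hm (gcong_gmul (gcong_red m (gpow (a, b) (2 * q.toNat)))
            (gcong_refl m (a, b))),
          show p.toNat = 2 * q.toNat + 1 from by omega]
      rfl
    · rw [if_neg (by rw [heven]; omega), hsq, show p.toNat = 2 * q.toNat from by omega]

-- invariant characterization of A's loop
lemma loopA_char {m : Int} (hm : m ≠ 0) :
    ∀ n (resr resi a b p : Int), 0 < p → p.toNat = n →
      calcLoopA resr resi a b p m = red m (gmul (resr, resi) (gpow (a, b) p.toNat)) := by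
  intro n
  induction n using Nat.strong_induction_on with
  | _ n ih =>
    intro resr resi a b p hp hn
    obtain ⟨hsum, hbit, hq0⟩ := step_arith hp
    rw [calcLoopA]
    simp only [dif_pos hp]
    set q := PySem.Int.floordiv p 2 with hq
    set res' := if PySem.Int.mod p 2 = 1 then pySquare resr resi a b m else (resr, resi) with hres'
    set z : Int × Int := (a, b) with hz
    have hres'c : GCong m res' (if PySem.Int.mod p 2 = 1 then gmul (resr, resi) z else (resr, resi)) := by
      rw [hres']
      rcases hbit with hodd | heven
      · rw [if_pos hodd, if_pos hodd, pySquare_eq_red_gmul hm]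
        exact gcong_red m _
      · rw [heven]; simp only [if_neg (by omega : ¬ (0:Int) = 1)]
        exact gcong_refl m _
    have hab' : pySquare a b a b m = red m (gmul z z) := pySquare_eq_red_gmul hm a b a b
    by_cases hqpos : 0 < q
    · rw [hab', ih q.toNat (by omega) res'.1 res'.2 (red m (gmul z z)).1 (red m (gmul z z)).2 q hqpos rfl]
      simp only [Prod.mk.eta]
      apply red_eq_of_gcong hm
      have hcong := gcong_gmul hres'c (gcong_gpow (gcong_red m (gmul z z)) q.toNat)
      have e : gmul (if PySem.Int.mod p 2 = 1 then gmul (resr, resi) z else (resr, resi))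
          (gpow (gmul z z) q.toNat) = gmul (resr, resi) (gpow z p.toNat) := by
        rw [gpow_sq]
        rcases hbit with hodd | heven
        · rw [if_pos hodd, gmul_assoc, gmul_comm z (gpow z (2 * q.toNat)),
              show p.toNat = 2 * q.toNat + 1 from by omega]
          rfl
        · rw [if_neg (by rw [heven]; omega), show p.toNat = 2 * q.toNat from by omega]
      exact e ▸ hcong
    · -- q = 0, so p = 1 and its bit is 1
      have hq0' : q = 0 := by omega
      have hpn : p.toNat = 1 := by omega
      have hodd : PySem.Int.mod p 2 = 1 := by omega
      rw [calcLoopA, dif_neg (by omega : ¬ q > 0)]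
      rw [hres', if_pos hodd, pySquare_eq_red_gmul hm, hpn]
      apply red_eq_of_gcong hm
      rw [show gpow z 1 = gmul (1, 0) z from rfl, gmul_one_left]
      exact gcong_refl m _

-- ===== VERDICT (by name: the statement is the Claim_ definition above) =====
theorem calc_py_spec : Claim_equal_calc_py := by
  intro a b p m _ hpre
  unfold Spec_calc_py calc_py
  by_cases hp : 0 < p
  · have hm : m ≠ 0 := by rcases hpre with h | h; omega; exact h
    rw [loopA_char hm p.toNat 1 0 a b p hp rfl,
        calcAlt_char hm p.toNat a b p hp rfl,
        gmul_one_left]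
  · rw [calcLoopA, dif_neg hp, calc_py_alt, dif_pos (by omega)]
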